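-- pv_equiv track=rewrite | github.com/hunghehe2205/VHung | src/diag_localization.py | _local_maxima
-- ===== SOURCE A (Python) =====
-- def _local_maxima(prob, min_dist=8):
--     """Indices of strict local maxima, deduped within min_dist."""
--     n = len(prob)
--     peaks = []
--     for t in range(n):
--         ok = True
--         for k in range(1, min_dist + 1):
--             if t - k >= 0 and prob[t - k] >= prob[t]:
--                 ok = False
--                 break
--             if t + k < n and prob[t + k] > prob[t]:
--                 ok = False
--                 break
--         if ok:
--             peaks.append(t)
--     dedup = []
--     for p in peaks:
--         if not dedup or p - dedup[-1] >= min_dist: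
--             dedup.append(p)
--     return dedup
-- ===== SOURCE B (Python) =====
-- def _local_maxima(prob, min_dist=8):
--     """Indices of strict local maxima, deduped within min_dist.
--
--     Monotonic-stack version: two stack sweeps give, for each t, the
--     nearest previous index with value >= prob[t] and the nearest next index
--     with value > prob[t]; t is a peak iff both are farther than min_dist.
--     The dedup is fused into the final pass."""
--     n = len(prob)
--     prev_ge = [None] * n  # nearest j < t with prob[j] >= prob[t]
--     stack = []
--     for t in range(n):
--         while stack and prob[stack[-1]] < prob[t]:
--             stack.pop()
--         if stack:
--             prev_ge[t] = stack[-1]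
--         stack.append(t)
--     next_gt = [None] * n  # nearest j > t with prob[j] > prob[t]
--     stack = []
--     for t in range(n - 1, -1, -1):
--         while stack and prob[stack[-1]] <= prob[t]:
--             stack.pop()
--         if stack:
--             next_gt[t] = stack[-1]
--         stack.append(t)
--     out = []
--     last = None
--     for t in range(n):
--         pg, ng = prev_ge[t], next_gt[t]
--         if (pg is None or t - pg > min_dist) and (ng is None or ng - t > min_dist):
--             if last is None or t - last >= min_dist:
--                 out.append(t)
--                 last = t
--     return out
-- ===== Notes on version B (the rewrite author's own statement) =====
-- stated objective: alternative
-- what changed: A rescans a min_dist-wide window around every index with an early-break k-loop; B makes two monotonic-stack sweeps computing the nearest previous >= element and the nearest next > element, tests each index against those two distances, and fuses the dedup into that final pass.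
import Mathlib
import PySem

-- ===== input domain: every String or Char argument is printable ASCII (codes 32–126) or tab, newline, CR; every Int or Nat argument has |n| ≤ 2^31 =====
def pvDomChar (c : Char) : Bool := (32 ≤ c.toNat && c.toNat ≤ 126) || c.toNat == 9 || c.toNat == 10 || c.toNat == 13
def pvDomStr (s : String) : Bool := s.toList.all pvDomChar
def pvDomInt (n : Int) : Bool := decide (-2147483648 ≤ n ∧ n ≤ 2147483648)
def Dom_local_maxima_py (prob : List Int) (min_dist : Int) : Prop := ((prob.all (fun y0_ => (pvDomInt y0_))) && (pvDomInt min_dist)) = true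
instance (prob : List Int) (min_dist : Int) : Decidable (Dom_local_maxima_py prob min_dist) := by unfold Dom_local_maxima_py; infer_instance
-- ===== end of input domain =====

-- B replaces A's per-index window rescan by two monotonic-stack sweeps (nearest
-- previous ≥ / nearest next > element) with the dedup fused into the final pass.

-- all index reads below are guarded to be in range, so the default 0 is never returned
def pvGet (prob : List Int) (i : Int) : Int := PySem.List.pyGetD prob i 0

-- ===== PORT A =====
-- inner 'for k in range(1, min_dist+1)' with its two early breaks
def pvAOk (prob : List Int) (n t : Int) : List Int → Bool
  | [] => true
  | k :: ks =>
    if t - k ≥ 0 ∧ pvGet prob (t - k) ≥ pvGet prob t then false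
    else if t + k < n ∧ pvGet prob (t + k) > pvGet prob t then false
    else pvAOk prob n t ks

def local_maxima_py (prob : List Int) (min_dist : Int) : List Int :=
  let n : Int := prob.length
  let peaks := (PySem.List.pyRange 0 n 1).foldl
    (fun acc t => if pvAOk prob n t (PySem.List.pyRange 1 (min_dist + 1) 1) then acc ++ [t] else acc) []
  peaks.foldl (fun dedup p =>
    match dedup.getLast? with
    | none => dedup ++ [p]
    | some l => if p - l ≥ min_dist then dedup ++ [p] else dedup) []

-- ===== PORT B =====
-- 'while stack and prob[stack[-1]] < v: stack.pop()'  (stack head = top)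
def pvPopLt (prob : List Int) (v : Int) : List Int → List Int
  | [] => []
  | j :: s => if pvGet prob j < v then pvPopLt prob v s else j :: s

-- 'while stack and prob[stack[-1]] <= v: stack.pop()'
def pvPopLe (prob : List Int) (v : Int) : List Int → List Int
  | [] => []
  | j :: s => if pvGet prob j ≤ v then pvPopLe prob v s else j :: s

-- forward sweep; prev_ge[t] is written for t = 0,1,…, so the array is built by appending
def pvFwd (prob : List Int) : List Int → List Int × List (Option Int) → List Int × List (Option Int)
  | [], st => st
  | t :: ts, (stack, pgs) =>
    let s := pvPopLt prob (pvGet prob t) stack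
    pvFwd prob ts (t :: s, pgs ++ [s.head?])

-- backward sweep; next_gt[t] is written for t = n-1,…,0, so the collected list is reversed
def pvBwd (prob : List Int) : List Int → List Int × List (Option Int) → List Int × List (Option Int)
  | [], st => st
  | t :: ts, (stack, ngs) =>
    let s := pvPopLe prob (pvGet prob t) stack
    pvBwd prob ts (t :: s, ngs ++ [s.head?])

def local_maxima_py_alt (prob : List Int) (min_dist : Int) : List Int :=
  let n : Int := prob.length
  let pgs := (pvFwd prob (PySem.List.pyRange 0 n 1) ([], [])).2
  let ngs := ((pvBwd prob (PySem.List.pyRange (n - 1) (-1) (-1)) ([], [])).2).reverse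
  let step := fun (st : List Int × Option Int) (t : Int) =>
    let pg := PySem.List.pyGetD pgs t none
    let ng := PySem.List.pyGetD ngs t none
    if (pg.all (fun j => t - j > min_dist)) && (ng.all (fun j => j - t > min_dist)) then
      match st.2 with
      | none => (st.1 ++ [t], some t)
      | some l => if t - l ≥ min_dist then (st.1 ++ [t], some t) else st
    else st
  ((PySem.List.pyRange 0 n 1).foldl step ([], none)).1

-- ===== PRECONDITION & SPEC =====
def Spec_local_maxima_py (prob : List Int) (min_dist : Int) (out : List Int) : Prop := out = local_maxima_py_alt prob min_dist
instance (prob : List Int) (min_dist : Int) (out : List Int) : Decidable (Spec_local_maxima_py prob min_dist out) := by unfold Spec_local_maxima_py; infer_instance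

-- ===== CLAIM (what is proved, stated in full; the proofs are below) =====
def Claim_equal_local_maxima_py : Prop := ∀ (prob : List Int) (min_dist : Int), Dom_local_maxima_py prob min_dist → Spec_local_maxima_py prob min_dist (local_maxima_py prob min_dist)

-- ===== LEMMAS AND PROOFS =====

-- the peak condition, as quantified propositions
def pvLeftOk (prob : List Int) (md t : Int) : Prop :=
  ∀ m, 0 ≤ m → t - md ≤ m → m < t → pvGet prob m < pvGet prob t
def pvRightOk (prob : List Int) (md n t : Int) : Prop :=
  ∀ m, t < m → m ≤ t + md → m < n → pvGet prob m ≤ pvGet prob t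

lemma pvAOk_iff (prob : List Int) (n t : Int) (ks : List Int) :
    pvAOk prob n t ks = true ↔
      ∀ k ∈ ks, (t - k ≥ 0 → pvGet prob (t - k) < pvGet prob t) ∧
                (t + k < n → pvGet prob (t + k) ≤ pvGet prob t) := by
  induction ks with
  | nil => simp [pvAOk]
  | cons k ks ih =>
    simp only [pvAOk]
    split_ifs with h1 h2
    · simp only [false_iff]
      intro h
      rcases h k (List.mem_cons_self) with ⟨hl, hr⟩
      omega
    · simp only [false_iff]
      intro h
      rcases h k (List.mem_cons_self) with ⟨hl, hr⟩
      omega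
    · rw [ih, List.forall_mem_cons]
      have hk : (t - k ≥ 0 → pvGet prob (t - k) < pvGet prob t) ∧
          (t + k < n → pvGet prob (t + k) ≤ pvGet prob t) := by
        constructor <;> intro h <;> omega
      exact ⟨fun h => ⟨hk, h⟩, fun h => h.2⟩

lemma pvAOk_range_iff (prob : List Int) (n t md : Int) :
    pvAOk prob n t (PySem.List.pyRange 1 (md + 1) 1) = true ↔
      pvLeftOk prob md t ∧ pvRightOk prob md n t := by
  rw [pvAOk_iff]
  constructor
  · intro h
    constructor
    · intro m h0 hmd hmt
      have hmem : (t - m) ∈ PySem.List.pyRange 1 (md + 1) 1 := by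
        rw [PySem.List.mem_pyRange_one]; omega
      have := (h _ hmem).1 (by omega)
      simpa [show t - (t - m) = m by omega] using this
    · intro m hmt hmd hmn
      have hmem : (m - t) ∈ PySem.List.pyRange 1 (md + 1) 1 := by
        rw [PySem.List.mem_pyRange_one]; omega
      have := (h _ hmem).2 (by omega)
      simpa [show t + (m - t) = m by omega] using this
  · rintro ⟨hL, hR⟩ k hk
    rw [PySem.List.mem_pyRange_one] at hk
    exact ⟨fun h0 => hL (t - k) (by omega) (by omega) (by omega),
           fun hn => hR (t + k) (by omega) (by omega) hn⟩

-- what each entry of the two auxiliary arrays means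
def PgSpec (prob : List Int) (t : Int) : Option Int → Prop
  | none => ∀ m, 0 ≤ m → m < t → pvGet prob m < pvGet prob t
  | some j => 0 ≤ j ∧ j < t ∧ pvGet prob t ≤ pvGet prob j ∧
      ∀ m, j < m → m < t → pvGet prob m < pvGet prob t

def NgSpec (prob : List Int) (n t : Int) : Option Int → Prop
  | none => ∀ m, t < m → m < n → pvGet prob m ≤ pvGet prob t
  | some j => t < j ∧ j < n ∧ pvGet prob t < pvGet prob j ∧
      ∀ m, t < m → m < j → pvGet prob m ≤ pvGet prob t

lemma pg_cond_iff (prob : List Int) (md t : Int) (o : Option Int) (h : PgSpec prob t o) :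
    (o.all (fun j => t - j > md)) = true ↔ pvLeftOk prob md t := by
  cases o with
  | none =>
    simp only [Option.all_none, true_iff]
    intro m h0 _ hmt
    exact h m h0 hmt
  | some j =>
    obtain ⟨h0, hjt, hval, hbtw⟩ := h
    simp only [Option.all_some, decide_eq_true_eq]
    constructor
    · intro hgt m hm0 hmd hmt
      exact hbtw m (by omega) hmt
    · intro hL
      by_contra hle
      have := hL j h0 (by omega) hjt
      omega

lemma ng_cond_iff (prob : List Int) (md n t : Int) (o : Option Int) (h : NgSpec prob n t o) :
    (o.all (fun j => j - t > md)) = true ↔ pvRightOk prob md n t := by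
  cases o with
  | none =>
    simp only [Option.all_none, true_iff]
    intro m hmt _ hmn
    exact h m hmt hmn
  | some j =>
    obtain ⟨htj, hjn, hval, hbtw⟩ := h
    simp only [Option.all_some, decide_eq_true_eq]
    constructor
    · intro hgt m hmt hmd hmn
      exact hbtw m hmt (by omega)
    · intro hR
      by_contra hle
      have := hR j htj (by omega) hjn
      omega

-- the monotonic-stack invariants
def FwdInv (prob : List Int) (t : Int) (s : List Int) : Prop :=
  (∀ j ∈ s, 0 ≤ j ∧ j < t) ∧ List.Pairwise (fun a b => b < a) s ∧
  (∀ m, 0 ≤ m → m < t → m ∉ s → ∃ j ∈ s, m < j ∧ pvGet prob m < pvGet prob j)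

def BwdInv (prob : List Int) (n t : Int) (s : List Int) : Prop :=
  (∀ j ∈ s, t < j ∧ j < n) ∧ List.Pairwise (fun a b => a < b) s ∧
  (∀ m, t < m → m < n → m ∉ s → ∃ j ∈ s, j < m ∧ pvGet prob m ≤ pvGet prob j)

lemma popLt_decompose (prob : List Int) (v : Int) (s : List Int) :
    ∃ pre, s = pre ++ pvPopLt prob v s ∧ (∀ m ∈ pre, pvGet prob m < v) ∧
      (∀ j, (pvPopLt prob v s).head? = some j → v ≤ pvGet prob j) := by
  induction s with
  | nil => exact ⟨[], by simp [pvPopLt]⟩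
  | cons j s ih =>
    by_cases hc : pvGet prob j < v
    · obtain ⟨pre, heq, hpre, hhd⟩ := ih
      refine ⟨j :: pre, ?_, ?_, ?_⟩
      · simp only [pvPopLt, if_pos hc]
        simpa using heq
      · intro m hm
        rcases List.mem_cons.mp hm with rfl | hm
        · exact hc
        · exact hpre m hm
      · simpa only [pvPopLt, if_pos hc] using hhd
    · refine ⟨[], ?_, by simp, ?_⟩
      · simp [pvPopLt, if_neg hc]
      · intro j' hj'
        simp only [pvPopLt, if_neg hc, List.head?_cons, Option.some.injEq] at hj'
        subst hj'
        omega

lemma popLe_decompose (prob : List Int) (v : Int) (s : List Int) :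
    ∃ pre, s = pre ++ pvPopLe prob v s ∧ (∀ m ∈ pre, pvGet prob m ≤ v) ∧
      (∀ j, (pvPopLe prob v s).head? = some j → v < pvGet prob j) := by
  induction s with
  | nil => exact ⟨[], by simp [pvPopLe]⟩
  | cons j s ih =>
    by_cases hc : pvGet prob j ≤ v
    · obtain ⟨pre, heq, hpre, hhd⟩ := ih
      refine ⟨j :: pre, ?_, ?_, ?_⟩
      · simp only [pvPopLe, if_pos hc]
        simpa using heq
      · intro m hm
        rcases List.mem_cons.mp hm with rfl | hm
        · exact hc
        · exact hpre m hm
      · simpa only [pvPopLe, if_pos hc] using hhd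
    · refine ⟨[], ?_, by simp, ?_⟩
      · simp [pvPopLe, if_neg hc]
      · intro j' hj'
        simp only [pvPopLe, if_neg hc, List.head?_cons, Option.some.injEq] at hj'
        subst hj'
        omega

lemma fwd_step (prob : List Int) (t : Int) (s : List Int) (ht : 0 ≤ t)
    (hinv : FwdInv prob t s) :
    PgSpec prob t (pvPopLt prob (pvGet prob t) s).head? ∧
    FwdInv prob (t + 1) (t :: pvPopLt prob (pvGet prob t) s) := by
  obtain ⟨hbnd, hpw, hcov⟩ := hinv
  obtain ⟨pre, heq, hpre, hhd⟩ := popLt_decompose prob (pvGet prob t) s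
  set s' := pvPopLt prob (pvGet prob t) s with hs'
  have hsub : ∀ j ∈ s', j ∈ s := fun j hj => heq ▸ List.mem_append_right _ hj
  have hpw' : List.Pairwise (fun a b => b < a) s' :=
    (List.pairwise_append.mp (heq ▸ hpw)).2.1
  -- any position below t and above all of s' carries a smaller value
  have hmain : ∀ m, 0 ≤ m → m < t → (∀ j ∈ s', j < m) → pvGet prob m < pvGet prob t := by
    intro m h0 hmt hgt
    by_cases hm : m ∈ s
    · rw [heq] at hm
      rcases List.mem_append.mp hm with hp | hp
      · exact hpre m hp
      · exact absurd (hgt m hp) (lt_irrefl m)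
    · rcases hcov m h0 hmt hm with ⟨j, hj, hmj, hv⟩
      rw [heq] at hj
      rcases List.mem_append.mp hj with hp | hp
      · exact lt_trans hv (hpre j hp)
      · exact absurd hmj (by have := hgt j hp; omega)
  constructor
  · -- PgSpec for the new top of stack
    cases hh : s'.head? with
    | none =>
      have hnil : s' = [] := List.head?_eq_none_iff.mp hh
      intro m h0 hmt
      exact hmain m h0 hmt (by simp [hnil])
    | some j0 =>
      obtain ⟨rest, hrest⟩ := List.head?_eq_some_iff.mp hh
      have hj0 : j0 ∈ s' := by rw [hrest]; exact List.mem_cons_self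
      obtain ⟨hj00, hj0t⟩ := hbnd j0 (hsub j0 hj0)
      refine ⟨hj00, hj0t, hhd j0 hh, ?_⟩
      intro m hj0m hmt
      refine hmain m (by omega) hmt ?_
      intro j hj
      rw [hrest] at hj
      rcases List.mem_cons.mp hj with rfl | hj
      · omega
      · have := (List.pairwise_cons.mp (hrest ▸ hpw')).1 j hj
        omega
  · -- invariant for the next index
    refine ⟨?_, ?_, ?_⟩
    · intro j hj
      rcases List.mem_cons.mp hj with rfl | hj
      · omega
      · have := hbnd j (hsub j hj); omega
    · refine List.pairwise_cons.mpr ⟨?_, hpw'⟩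
      intro j hj
      exact (hbnd j (hsub j hj)).2
    · intro m h0 hmt hnin
      have hmne : m ≠ t := fun h => hnin (h ▸ List.mem_cons_self)
      have hms' : m ∉ s' := fun h => hnin (List.mem_cons_of_mem _ h)
      have hmt' : m < t := by omega
      by_cases hm : m ∈ s
      · rw [heq] at hm
        rcases List.mem_append.mp hm with hp | hp
        · exact ⟨t, List.mem_cons_self, hmt', hpre m hp⟩
        · exact absurd hp hms'
      · rcases hcov m h0 hmt' hm with ⟨j, hj, hmj, hv⟩
        rw [heq] at hj
        rcases List.mem_append.mp hj with hp | hp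
        · exact ⟨t, List.mem_cons_self, hmt', lt_trans hv (hpre j hp)⟩
        · exact ⟨j, List.mem_cons_of_mem _ hp, hmj, hv⟩

lemma bwd_step (prob : List Int) (n t : Int) (s : List Int) (ht : t < n)
    (hinv : BwdInv prob n t s) :
    NgSpec prob n t (pvPopLe prob (pvGet prob t) s).head? ∧
    BwdInv prob n (t - 1) (t :: pvPopLe prob (pvGet prob t) s) := by
  obtain ⟨hbnd, hpw, hcov⟩ := hinv
  obtain ⟨pre, heq, hpre, hhd⟩ := popLe_decompose prob (pvGet prob t) s
  set s' := pvPopLe prob (pvGet prob t) s with hs'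
  have hsub : ∀ j ∈ s', j ∈ s := fun j hj => heq ▸ List.mem_append_right _ hj
  have hpw' : List.Pairwise (fun a b => a < b) s' :=
    (List.pairwise_append.mp (heq ▸ hpw)).2.1
  have hmain : ∀ m, t < m → m < n → (∀ j ∈ s', m < j) → pvGet prob m ≤ pvGet prob t := by
    intro m hmt hmn hgt
    by_cases hm : m ∈ s
    · rw [heq] at hm
      rcases List.mem_append.mp hm with hp | hp
      · exact hpre m hp
      · exact absurd (hgt m hp) (lt_irrefl m)
    · rcases hcov m hmt hmn hm with ⟨j, hj, hmj, hv⟩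
      rw [heq] at hj
      rcases List.mem_append.mp hj with hp | hp
      · exact le_trans hv (hpre j hp)
      · exact absurd hmj (by have := hgt j hp; omega)
  constructor
  · cases hh : s'.head? with
    | none =>
      have hnil : s' = [] := List.head?_eq_none_iff.mp hh
      intro m hmt hmn
      exact hmain m hmt hmn (by simp [hnil])
    | some j0 =>
      obtain ⟨rest, hrest⟩ := List.head?_eq_some_iff.mp hh
      have hj0 : j0 ∈ s' := by rw [hrest]; exact List.mem_cons_self
      obtain ⟨htj0, hj0n⟩ := hbnd j0 (hsub j0 hj0)
      refine ⟨htj0, hj0n, hhd j0 hh, ?_⟩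
      intro m hmt hmj0
      refine hmain m hmt (by omega) ?_
      intro j hj
      rw [hrest] at hj
      rcases List.mem_cons.mp hj with rfl | hj
      · omega
      · have := (List.pairwise_cons.mp (hrest ▸ hpw')).1 j hj
        omega
  · refine ⟨?_, ?_, ?_⟩
    · intro j hj
      rcases List.mem_cons.mp hj with rfl | hj
      · omega
      · have := hbnd j (hsub j hj); omega
    · refine List.pairwise_cons.mpr ⟨?_, hpw'⟩
      intro j hj
      exact (hbnd j (hsub j hj)).1
    · intro m hmt hmn hnin
      have hmne : m ≠ t := fun h => hnin (h ▸ List.mem_cons_self)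
      have hms' : m ∉ s' := fun h => hnin (List.mem_cons_of_mem _ h)
      have hmt' : t < m := by omega
      by_cases hm : m ∈ s
      · rw [heq] at hm
        rcases List.mem_append.mp hm with hp | hp
        · exact ⟨t, List.mem_cons_self, hmt', hpre m hp⟩
        · exact absurd hp hms'
      · rcases hcov m hmt' hmn hm with ⟨j, hj, hmj, hv⟩
        rw [heq] at hj
        rcases List.mem_append.mp hj with hp | hp
        · exact ⟨t, List.mem_cons_self, hmt', le_trans hv (hpre j hp)⟩
        · exact ⟨j, List.mem_cons_of_mem _ hp, hmj, hv⟩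

lemma fwd_go (prob : List Int) (n : Int) : ∀ (c : Nat) (t : Int) (s : List Int)
    (acc : List (Option Int)), 0 ≤ t → t + c = n → FwdInv prob t s →
    ∃ tail, (pvFwd prob (PySem.List.pyRange t n 1) (s, acc)).2 = acc ++ tail ∧
      tail.length = c ∧ ∀ (k : Nat) (hk : k < tail.length), PgSpec prob (t + k) tail[k] := by
  intro c
  induction c with
  | zero =>
    intro t s acc h0 hsum hinv
    rw [PySem.List.pyRange_one_eq_nil (by omega)]
    exact ⟨[], by simp [pvFwd], rfl, by intro k hk; simp at hk⟩
  | succ c ih =>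
    intro t s acc h0 hsum hinv
    have htn : t < n := by omega
    rw [PySem.List.pyRange_one_cons htn]
    obtain ⟨hspec, hinv'⟩ := fwd_step prob t s h0 hinv
    obtain ⟨tail, heq, hlen, hall⟩ := ih (t + 1) (t :: pvPopLt prob (pvGet prob t) s)
      (acc ++ [(pvPopLt prob (pvGet prob t) s).head?]) (by omega) (by push_cast at hsum ⊢; omega) hinv'
    refine ⟨(pvPopLt prob (pvGet prob t) s).head? :: tail, ?_, by simp [hlen], ?_⟩
    · show (pvFwd prob _ (t :: pvPopLt prob (pvGet prob t) s,
        acc ++ [(pvPopLt prob (pvGet prob t) s).head?])).2 = _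
      rw [heq]
      simp
    · intro k hk
      cases k with
      | zero => simpa using hspec
      | succ k =>
        have hk' : k < tail.length := by simp at hk; omega
        have h2 := hall k hk'
        simp only [List.getElem_cons_succ]
        rw [show t + ((k + 1 : Nat) : Int) = (t + 1) + (k : Int) by push_cast; omega]
        exact h2

lemma bwd_go (prob : List Int) (n : Int) : ∀ (c : Nat) (t : Int) (s : List Int)
    (acc : List (Option Int)), t < n → t + 1 = c → BwdInv prob n t s →
    ∃ tail, (pvBwd prob (PySem.List.pyRange t (-1) (-1)) (s, acc)).2 = acc ++ tail ∧
      tail.length = c ∧ ∀ (k : Nat) (hk : k < tail.length), NgSpec prob n (t - k) tail[k] := by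
  intro c
  induction c with
  | zero =>
    intro t s acc htn hsum hinv
    rw [PySem.List.pyRange_neg_one_eq_nil (by omega)]
    exact ⟨[], by simp [pvBwd], rfl, by intro k hk; simp at hk⟩
  | succ c ih =>
    intro t s acc htn hsum hinv
    have h0 : 0 ≤ t := by omega
    rw [PySem.List.pyRange_neg_one_cons (by omega)]
    obtain ⟨hspec, hinv'⟩ := bwd_step prob n t s htn hinv
    obtain ⟨tail, heq, hlen, hall⟩ := ih (t - 1) (t :: pvPopLe prob (pvGet prob t) s)
      (acc ++ [(pvPopLe prob (pvGet prob t) s).head?]) (by omega) (by push_cast at hsum ⊢; omega) hinv'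
    refine ⟨(pvPopLe prob (pvGet prob t) s).head? :: tail, ?_, by simp [hlen], ?_⟩
    · show (pvBwd prob _ (t :: pvPopLe prob (pvGet prob t) s,
        acc ++ [(pvPopLe prob (pvGet prob t) s).head?])).2 = _
      rw [heq]
      simp
    · intro k hk
      cases k with
      | zero => simpa using hspec
      | succ k =>
        have hk' : k < tail.length := by simp at hk; omega
        have h2 := hall k hk'
        simp only [List.getElem_cons_succ]
        rw [show t - ((k + 1 : Nat) : Int) = (t - 1) - (k : Int) by push_cast; omega]
        exact h2

-- the fused dedup loop of B equals A's separate dedup pass over the filtered list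
lemma fused_eq_dedup (md : Int) (pB : Int → Bool) : ∀ (l : List Int) (out : List Int),
    ((l.foldl (fun st t =>
        if pB t then
          match st.2 with
          | none => (st.1 ++ [t], some t)
          | some last => if t - last ≥ md then (st.1 ++ [t], some t) else st
        else st) (out, out.getLast?)).1)
    = (l.filter pB).foldl (fun dedup p =>
        match dedup.getLast? with
        | none => dedup ++ [p]
        | some last => if p - last ≥ md then dedup ++ [p] else dedup) out := by
  intro l
  induction l with
  | nil => intro out; simp
  | cons t l ih =>
    intro out
    simp only [List.foldl_cons, List.filter_cons]
    by_cases hp : pB t = true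
    · cases hl : out.getLast? with
      | none =>
        simp only [hl, hp, if_true, List.foldl_cons]
        rw [← List.getLast?_concat]
        exact ih (out ++ [t])
      | some last =>
        simp only [hl, hp, if_true, List.foldl_cons]
        by_cases hd : t - last ≥ md
        · simp only [if_pos hd]
          rw [← List.getLast?_concat]
          exact ih (out ++ [t])
        · simp only [if_neg hd]
          rw [← hl]
          exact ih out
    · simp only [Bool.not_eq_true] at hp
      simp only [hp, Bool.false_eq_true, if_false]
      exact ih out

-- ===== VERDICT (by name: the statement is the Claim_ definition above) =====
theorem local_maxima_py_spec : Claim_equal_local_maxima_py := by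
  intro prob min_dist _
  unfold Spec_local_maxima_py
  have hn0 : (0 : Int) ≤ (prob.length : Int) := Int.natCast_nonneg _
  obtain ⟨ptail, hpeq, hplen, hpall⟩ :=
    fwd_go prob (prob.length : Int) prob.length 0 [] [] le_rfl (by simp)
      ⟨by simp, by simp, fun m h0 hm _ => absurd hm (by omega)⟩
  obtain ⟨ntail, hneq, hnlen, hnall⟩ :=
    bwd_go prob (prob.length : Int) prob.length ((prob.length : Int) - 1) [] []
      (by omega) (by omega) ⟨by simp, by simp, fun m hm1 hm2 _ => absurd hm2 (by omega)⟩
  rw [List.nil_append] at hpeq hneq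
  -- pointwise: A's window scan agrees with B's stack-derived test
  have hcond : ∀ t ∈ PySem.List.pyRange 0 (prob.length : Int) 1,
      pvAOk prob (prob.length : Int) t (PySem.List.pyRange 1 (min_dist + 1) 1)
      = (((PySem.List.pyGetD ((pvFwd prob (PySem.List.pyRange 0 (prob.length : Int) 1) ([], [])).2) t none).all
            (fun j => t - j > min_dist)) &&
         ((PySem.List.pyGetD (((pvBwd prob (PySem.List.pyRange ((prob.length : Int) - 1) (-1) (-1)) ([], [])).2).reverse) t none).all
            (fun j => j - t > min_dist))) := by
    intro t ht
    rw [PySem.List.mem_pyRange_one] at ht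
    obtain ⟨ht0, htn⟩ := ht
    have htlt : t.toNat < ptail.length := by omega
    have e1 : PySem.List.pyGetD ((pvFwd prob (PySem.List.pyRange 0 (prob.length : Int) 1) ([], [])).2) t none
        = ptail[t.toNat] := by
      rw [hpeq]
      exact PySem.List.pyGetD_eq_getElem ptail none ht0 (by omega)
    have hpg : PgSpec prob t (ptail[t.toNat]) := by
      have h2 := hpall t.toNat htlt
      have e : (0 : Int) + (t.toNat : Int) = t := by omega
      rw [e] at h2
      exact h2
    have e2 : PySem.List.pyGetD (((pvBwd prob (PySem.List.pyRange ((prob.length : Int) - 1) (-1) (-1)) ([], [])).2).reverse) t none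
        = ntail[ntail.length - 1 - t.toNat]'(by omega) := by
      rw [hneq]
      rw [PySem.List.pyGetD_eq_getElem ntail.reverse none ht0 (by simp; omega)]
      exact List.getElem_reverse _
    have hng : NgSpec prob (prob.length : Int) t (ntail[ntail.length - 1 - t.toNat]'(by omega)) := by
      have hk : ntail.length - 1 - t.toNat < ntail.length := by omega
      have h2 := hnall (ntail.length - 1 - t.toNat) hk
      have e : (prob.length : Int) - 1 - ((ntail.length - 1 - t.toNat : Nat) : Int) = t := by omega
      rw [e] at h2
      exact h2
    rw [e1, e2, Bool.eq_iff_iff, Bool.and_eq_true,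
        pg_cond_iff prob min_dist t _ hpg, ng_cond_iff prob min_dist (prob.length : Int) t _ hng,
        pvAOk_range_iff]
  have hA : local_maxima_py prob min_dist
      = ((PySem.List.pyRange 0 (prob.length : Int) 1).filter
          (fun t => pvAOk prob (prob.length : Int) t (PySem.List.pyRange 1 (min_dist + 1) 1))).foldl
          (fun dedup p => match dedup.getLast? with
            | none => dedup ++ [p]
            | some l => if p - l ≥ min_dist then dedup ++ [p] else dedup) [] := by
    unfold local_maxima_py
    show (List.foldl (fun dedup p => match dedup.getLast? with
            | none => dedup ++ [p]
            | some l => if p - l ≥ min_dist then dedup ++ [p] else dedup) []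
          (List.foldl (fun acc t =>
              if pvAOk prob (prob.length : Int) t (PySem.List.pyRange 1 (min_dist + 1) 1) = true
              then acc ++ [t] else acc) [] (PySem.List.pyRange 0 (prob.length : Int) 1))) = _
    rw [PySem.List.foldl_append_if_eq_filter, List.nil_append]
  have hB := fused_eq_dedup min_dist
      (fun t => (((PySem.List.pyGetD ((pvFwd prob (PySem.List.pyRange 0 (prob.length : Int) 1) ([], [])).2) t none).all
            (fun j => t - j > min_dist)) &&
         ((PySem.List.pyGetD (((pvBwd prob (PySem.List.pyRange ((prob.length : Int) - 1) (-1) (-1)) ([], [])).2).reverse) t none).all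
            (fun j => j - t > min_dist))))
      (PySem.List.pyRange 0 (prob.length : Int) 1) ([] : List Int)
  rw [hA, List.filter_congr hcond]
  exact hB.symm
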